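-- pv_equiv track=rewrite | github.com/uvsq22102103/taquin | projet.py | resolvable
-- ===== SOURCE A (Python) =====
-- def resolvable(mixe: list, solution: list):
--     """Vérifie si la grille potentielle est résolvable et retourne
--     le booléen associé"""
--     solution = solution[0] + solution[1] + solution[2] + solution[3]
--     mixe = mixe[0] + mixe[1] + mixe[2] + mixe[3]
--     cpt = 0
--     for i in range(15):
--         if solution[i] != mixe[i]:
--             mixe[mixe.index(solution[i])] = mixe[i]
--             mixe[i] = solution[i]
--             cpt += 1
--     if cpt % 2 == 0:
--         return True
--     else:
--         return False
-- ===== SOURCE B (Python) =====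
-- def resolvable(mixe: list, solution: list):
--     """Pure functional version: recursion over the 15 steps; the board is an
--     immutable list rebuilt by ONE fused scan per step (the wanted tile's first
--     occurrence is replaced by the displaced tile while the list is rebuilt,
--     instead of an .index search followed by two in-place writes), and the
--     solvability parity is a boolean toggle instead of a counter."""
--     sol = solution[0] + solution[1] + solution[2] + solution[3]
--
--     def step(board, i):
--         v, w = sol[i], board[i]
--         if v == w:
--             return board, False
--         out, swapped = [], False
--         for p, x in enumerate(board):
--             if p == i:
--                 out.append(v)
--             elif not swapped and x == v:
--                 out.append(w)
--                 swapped = True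
--             else:
--                 out.append(x)
--         return out, True
--
--     def go(board, i, odd):
--         if i >= 15:
--             return not odd
--         board, changed = step(board, i)
--         return go(board, i + 1, odd != changed)
--
--     return go(mixe[0] + mixe[1] + mixe[2] + mixe[3], 0, False)
-- ===== Notes on version B (the rewrite author's own statement) =====
-- stated objective: alternative
-- what changed: A's observable behaviour on duplicate tiles forces the same sequential step semantics, so B reproduces it with a different decomposition and data handling: pure recursion over the 15 steps on an immutable board, each step rebuilt by ONE fused scan that replaces the wanted tile's first occurrence by the displaced tile (no .index search, no in-place writes), with solvability parity kept as a boolean toggle instead of a counter taken mod 2.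
import Mathlib
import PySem

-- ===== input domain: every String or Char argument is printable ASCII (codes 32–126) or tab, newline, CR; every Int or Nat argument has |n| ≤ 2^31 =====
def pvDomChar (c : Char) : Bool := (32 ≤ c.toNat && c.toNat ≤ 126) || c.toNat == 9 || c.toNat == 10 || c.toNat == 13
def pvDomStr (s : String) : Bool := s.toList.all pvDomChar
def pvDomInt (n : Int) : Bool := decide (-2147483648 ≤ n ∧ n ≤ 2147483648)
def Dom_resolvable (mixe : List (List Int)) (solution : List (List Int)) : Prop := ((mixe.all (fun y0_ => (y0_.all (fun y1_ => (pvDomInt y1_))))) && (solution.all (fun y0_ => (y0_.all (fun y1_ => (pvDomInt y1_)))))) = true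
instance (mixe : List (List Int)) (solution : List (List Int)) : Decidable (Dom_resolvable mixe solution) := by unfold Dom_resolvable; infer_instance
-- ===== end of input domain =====

-- B keeps A's forced step semantics but is pure: recursion over the 15 steps, the
-- board rebuilt immutably by one fused scan per step (no .index, no writes), and the
-- parity kept as a boolean toggle instead of a counter.

-- ===== PORT A =====
def pvFlat (g : List (List Int)) : List Int :=
  g.getD 0 [] ++ g.getD 1 [] ++ g.getD 2 [] ++ g.getD 3 []

def pidx (l : List Int) (v : Int) : Nat := (PySem.List.index? l v).getD 0

def bodyA (sol : List Int) (st : List Int × Nat) (i : Nat) : List Int × Nat :=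
  if sol.getD i 0 ≠ st.1.getD i 0 then
    ((st.1.set (pidx st.1 (sol.getD i 0)) (st.1.getD i 0)).set i (sol.getD i 0), st.2 + 1)
  else st

def resolvable (mixe : List (List Int)) (solution : List (List Int)) : Bool :=
  let sol := pvFlat solution
  let mx := pvFlat mixe
  let st := (List.range 15).foldl (bodyA sol) (mx, 0)
  st.2 % 2 == 0

-- ===== PORT B =====
-- the fused scan of Source B's `step`: rebuild the board, writing `v` at position `i`
-- and `w` at the first other occurrence of `v`
def rebuild (v w : Int) (i : Nat) : List Int → Nat → Bool → List Int
  | [], _, _ => []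
  | x :: t, p, swapped =>
    if p = i then v :: rebuild v w i t (p + 1) swapped
    else if swapped = false ∧ x = v then w :: rebuild v w i t (p + 1) true
    else x :: rebuild v w i t (p + 1) swapped

def stepB (sol board : List Int) (i : Nat) : List Int × Bool :=
  if sol.getD i 0 = board.getD i 0 then (board, false)
  else (rebuild (sol.getD i 0) (board.getD i 0) i board 0 false, true)

-- Source B's `go`, with the recursion made structural on the number of remaining steps
-- (fuel = 15 - i; the `15 ≤ i` test is Python's `i >= 15` guard)
def goB (sol board : List Int) (fuel i : Nat) (odd : Bool) : Bool :=
  match fuel with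
  | 0 => !odd
  | f + 1 =>
    if 15 ≤ i then !odd
    else goB sol (stepB sol board i).1 f (i + 1) (odd ^^ (stepB sol board i).2)

def resolvable_alt (mixe : List (List Int)) (solution : List (List Int)) : Bool :=
  goB (pvFlat solution) (pvFlat mixe) 15 0 false

-- ===== PRECONDITION & SPEC =====
-- Pre_ is exactly the closed form of A's returning domain: four rows on each side,
-- at least 15 flattened cells on each side, and every one of the first 15 flattened
-- solution cells present in the flattened mixe (A's .index then succeeds at every
-- step, because its swaps preserve the board's multiset of values); outside it A
-- raises IndexError or ValueError.
def Pre_resolvable (mixe : List (List Int)) (solution : List (List Int)) : Prop :=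
  4 ≤ mixe.length ∧ 4 ≤ solution.length ∧ 15 ≤ (pvFlat solution).length ∧
    15 ≤ (pvFlat mixe).length ∧ ∀ i : Nat, i < 15 → (pvFlat solution).getD i 0 ∈ pvFlat mixe
instance (mixe : List (List Int)) (solution : List (List Int)) : Decidable (Pre_resolvable mixe solution) := by unfold Pre_resolvable; infer_instance

def pvWitness_resolvable : List (List Int) × List (List Int) :=
  ([[1, 2, 3, 4], [5, 6, 7, 8], [9, 10, 11, 12], [13, 15, 14, 0]],
   [[1, 2, 3, 4], [5, 6, 7, 8], [9, 10, 11, 12], [13, 14, 15, 0]])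

def Spec_resolvable (mixe : List (List Int)) (solution : List (List Int)) (out : Bool) : Prop := out = resolvable_alt mixe solution
instance (mixe : List (List Int)) (solution : List (List Int)) (out : Bool) : Decidable (Spec_resolvable mixe solution out) := by unfold Spec_resolvable; infer_instance

-- ===== CLAIM (what is proved, stated in full; the proofs are below) =====
def Claim_equal_resolvable : Prop := ∀ (mixe : List (List Int)) (solution : List (List Int)), Dom_resolvable mixe solution → Pre_resolvable mixe solution → Spec_resolvable mixe solution (resolvable mixe solution)

-- ===== LEMMAS AND PROOFS =====

-- first-occurrence index: specification (from PySem.List.index?)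
theorem pidx_spec (l : List Int) (v : Int) (hv : v ∈ l) :
    ∃ (hk : pidx l v < l.length), l[pidx l v] = v ∧ ∀ j (hj : j < pidx l v), l[j]'(by omega) ≠ v := by
  have h : (PySem.List.index? l v).isSome := (PySem.List.index?_isSome_iff l v).2 hv
  obtain ⟨k, hk⟩ := Option.isSome_iff_exists.1 h
  have : PySem.List.index? l v = some (pidx l v) := by unfold pidx; rw [hk]; rfl
  exact PySem.List.getElem_of_index?_eq_some this

-- `paint v i l k`: the identity scan that only writes `v` at absolute position `i`
def paint (v : Int) (i : Nat) : List Int → Nat → List Int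
  | [], _ => []
  | x :: t, k => (if k = i then v else x) :: paint v i t (k + 1)

theorem rebuild_true (v w : Int) (i : Nat) :
    ∀ (l : List Int) (k : Nat), rebuild v w i l k true = paint v i l k := by
  intro l
  induction l with
  | nil => intro k; rfl
  | cons x t ih =>
    intro k
    simp only [rebuild, paint]
    by_cases hk : k = i
    · rw [if_pos hk, if_pos hk, ih]
    · rw [if_neg hk, if_neg hk, if_neg (by simp), ih]

theorem rebuild_split (v w : Int) (i : Nat) (b : List Int) :
    ∀ (a : List Int) (k : Nat), v ∉ a → k + a.length ≠ i →
      rebuild v w i (a ++ v :: b) k false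
        = paint v i a k ++ w :: paint v i b (k + a.length + 1) := by
  intro a
  induction a with
  | nil =>
    intro k _ hk
    have hk' : k ≠ i := by simpa using hk
    simp only [List.nil_append, rebuild, paint, List.length_nil]
    rw [if_neg hk', if_pos (by simp), rebuild_true]
  | cons x t ih =>
    intro k hnv hk
    have hx : x ≠ v := fun h => hnv (by rw [h]; exact List.mem_cons_self)
    have ht : v ∉ t := fun h => hnv (List.mem_cons_of_mem x h)
    have hk' : (k + 1) + t.length ≠ i := by simp at hk; omega
    simp only [List.cons_append, rebuild, paint]
    by_cases hki : k = i
    · rw [if_pos hki, if_pos hki, ih (k + 1) ht hk']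
      simp only [List.length_cons]
      have : k + 1 + t.length = k + (t.length + 1) := by omega
      rw [this]
    · rw [if_neg hki, if_neg hki, if_neg (by simp [hx]), ih (k + 1) ht hk']
      simp only [List.length_cons]
      have : k + 1 + t.length = k + (t.length + 1) := by omega
      rw [this]

theorem paint_eq (v : Int) (i : Nat) :
    ∀ (l : List Int) (k : Nat),
      paint v i l k = if k ≤ i ∧ i < k + l.length then l.set (i - k) v else l := by
  intro l
  induction l with
  | nil => intro k; simp [paint]
  | cons x t ih =>
    intro k
    simp only [paint]
    by_cases hk : k = i
    · subst hk
      rw [if_pos rfl, ih, if_neg (by omega), if_pos ⟨le_refl _, by simp⟩]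
      simp
    · rw [if_neg hk, ih]
      by_cases hcond : k + 1 ≤ i ∧ i < k + 1 + t.length
      · rw [if_pos hcond, if_pos (by simp; omega)]
        have : i - k = (i - (k + 1)) + 1 := by omega
        rw [this, List.set_cons_succ]
      · rw [if_neg hcond, if_neg (by simp at hcond ⊢; omega)]

-- the fused scan equals A's two point-writes (first occurrence of v swapped with cell i)
theorem rebuild_eq_swap (l : List Int) (v w : Int) (i j : Nat) (hj : j < l.length)
    (hjeq : l[j] = v) (hjfirst : ∀ q (hq : q < j), l[q]'(by omega) ≠ v)
    (hi : i < l.length) (hne : l.getD i 0 ≠ v) :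
    rebuild v w i l 0 false = (l.set j w).set i v := by
  have hij : j ≠ i := by
    intro h
    apply hne
    rw [List.getD_eq_getElem l 0 hi]
    subst h
    exact hjeq
  have hlt : (l.take j).length = j := by
    rw [List.length_take]; omega
  have hnv : v ∉ l.take j := by
    intro hmem
    obtain ⟨q, hq, he⟩ := List.getElem_of_mem hmem
    have hql : q < j := by rw [hlt] at hq; exact hq
    have : (l.take j)[q] = l[q]'(by omega) := List.getElem_take
    rw [this] at he
    exact hjfirst q hql he
  have hsplit : l = l.take j ++ v :: l.drop (j + 1) := by
    conv_lhs => rw [← List.take_append_drop j l]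
    rw [List.drop_eq_getElem_cons hj, hjeq]
  have hdlen : (l.drop (j + 1)).length = l.length - (j + 1) := by
    rw [List.length_drop]
  conv_lhs => rw [hsplit]
  rw [rebuild_split v w i (l.drop (j + 1)) (l.take j) 0 hnv (by rw [hlt]; omega)]
  conv_rhs => rw [hsplit]
  rw [show (l.take j ++ v :: l.drop (j + 1)).set j w = l.take j ++ w :: l.drop (j + 1) by
    rw [List.set_append_right _ _ (by rw [hlt]), hlt, Nat.sub_self, List.set_cons_zero]]
  rw [paint_eq, paint_eq, hlt]
  rcases Nat.lt_or_ge i j with hilt | hige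
  · rw [if_pos ⟨by omega, by omega⟩, if_neg (by omega),
      List.set_append_left _ _ (by rw [hlt]; omega), Nat.sub_zero]
  · have higt : j < i := by omega
    rw [if_neg (by omega), if_pos ⟨by omega, by rw [hdlen]; omega⟩]
    rw [List.set_append_right _ _ (by rw [hlt]; omega), hlt]
    have : i - j = (i - (j + 1)) + 1 := by omega
    rw [this, List.set_cons_succ]
    simp only [Nat.zero_add]

-- multiset invariance of A's swap
theorem count_set_add : ∀ (l : List Int) (k : Nat) (b a : Int) (hk : k < l.length),
    (l.set k b).count a + (if l[k]'hk == a then 1 else 0) = l.count a + (if b == a then 1 else 0) := by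
  intro l
  induction l with
  | nil => intro k b a hk; simp at hk
  | cons x t ih =>
    intro k b a hk
    match k with
    | 0 => simp [List.count_cons]; split_ifs <;> omega
    | k + 1 =>
      have hk' : k < t.length := by simpa using hk
      have := ih k b a hk'
      simp only [List.set_cons_succ, List.count_cons, List.getElem_cons_succ]
      split_ifs at this ⊢ <;> omega

theorem perm_swap_set (l : List Int) (i j : Nat) (hi : i < l.length) (hj : j < l.length)
    (hij : i ≠ j) : ((l.set j (l[i]'hi)).set i (l[j]'hj)).Perm l := by
  rw [List.perm_iff_count]
  intro a
  have hi' : i < (l.set j (l[i]'hi)).length := by simpa using hi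
  have h1 := count_set_add (l.set j (l[i]'hi)) i (l[j]'hj) a hi'
  have h2 := count_set_add l j (l[i]'hi) a hj
  have e : (l.set j (l[i]'hi))[i]'hi' = l[i]'hi := List.getElem_set_ne (fun h => hij h.symm) _
  rw [e] at h1
  split_ifs at h1 h2 <;> omega

-- A's counter is additive: the board trajectory does not depend on the counter value
theorem foldl_cpt (sol : List Int) :
    ∀ (l : List Nat) (b : List Int) (c : Nat),
      l.foldl (bodyA sol) (b, c) = ((l.foldl (bodyA sol) (b, 0)).1, c + (l.foldl (bodyA sol) (b, 0)).2) := by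
  intro l
  induction l with
  | nil => intro b c; simp
  | cons i t ih =>
    intro b c
    rw [List.foldl_cons, List.foldl_cons]
    by_cases hc : sol.getD i 0 ≠ b.getD i 0
    · simp only [bodyA, if_pos hc]
      rw [ih _ (c + 1), ih _ 1]
      simp only [Prod.mk.injEq]
      exact ⟨trivial, by omega⟩
    · simp only [bodyA, if_neg hc]
      exact ih b c

theorem decide_parity (n : Nat) : decide ((1 + n) % 2 = 1) = !decide (n % 2 = 1) := by
  by_cases h : n % 2 = 1
  · have h2 : (1 + n) % 2 = 0 := by omega
    simp [h, h2]
  · have h2 : (1 + n) % 2 = 1 := by omega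
    have h0 : n % 2 = 0 := by omega
    simp [h0, h2]

-- the synchronisation of B's recursion with A's fold
theorem loop_sync (sol mx0 : List Int) (hmem : ∀ t, t < 15 → sol.getD t 0 ∈ mx0)
    (hlen : 15 ≤ mx0.length) :
    ∀ (c m : Nat), m + c = 15 → ∀ (board : List Int) (odd : Bool), board.Perm mx0 →
      goB sol board c m odd
        = !(odd ^^ decide ((((List.range' m c).foldl (bodyA sol) (board, 0)).2) % 2 = 1)) := by
  intro c
  induction c with
  | zero =>
    intro m hm board odd _
    simp [goB]
  | succ c ih =>
    intro m hm board odd hperm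
    have hmlt : ¬ 15 ≤ m := by omega
    show (if 15 ≤ m then !odd
        else goB sol (stepB sol board m).1 c (m + 1) (odd ^^ (stepB sol board m).2)) = _
    rw [if_neg hmlt, List.range'_succ, List.foldl_cons]
    by_cases heq : sol.getD m 0 = board.getD m 0
    · have hstep : stepB sol board m = (board, false) := by
        simp only [stepB, if_pos heq]
      have hbody : bodyA sol (board, 0) m = (board, 0) := by
        simp only [bodyA, if_neg (not_not.2 heq)]
      rw [hstep, hbody, Bool.xor_false]
      exact ih (m + 1) (by omega) board odd hperm
    · have hne : sol.getD m 0 ≠ board.getD m 0 := heq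
      have hbl : m < board.length := by rw [hperm.length_eq]; omega
      have hv : sol.getD m 0 ∈ board := hperm.mem_iff.2 (hmem m (by omega))
      have hstep : stepB sol board m
          = ((board.set (pidx board (sol.getD m 0)) (board.getD m 0)).set m (sol.getD m 0), true) := by
        simp only [stepB, if_neg heq]
        obtain ⟨hj', hjeq', hjfirst'⟩ := pidx_spec board (sol.getD m 0) hv
        rw [rebuild_eq_swap board (sol.getD m 0) (board.getD m 0) m (pidx board (sol.getD m 0))
          hj' hjeq' hjfirst' hbl (fun h => hne h.symm)]
      have hbody : bodyA sol (board, 0) m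
          = ((board.set (pidx board (sol.getD m 0)) (board.getD m 0)).set m (sol.getD m 0), 1) := by
        simp only [bodyA, if_pos hne]
      obtain ⟨hj, hjeq, -⟩ := pidx_spec board (sol.getD m 0) hv
      have hjD : board.getD (pidx board (sol.getD m 0)) 0 = sol.getD m 0 := by
        rw [List.getD_eq_getElem board 0 hj, hjeq]
      have hij : m ≠ pidx board (sol.getD m 0) := by
        intro h
        apply hne
        conv_rhs => rw [h]
        exact hjD.symm
      have hperm2 : ((board.set (pidx board (sol.getD m 0)) (board.getD m 0)).set m (sol.getD m 0)).Perm mx0 := by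
        have base := perm_swap_set board m (pidx board (sol.getD m 0)) hbl hj hij
        rw [hjeq] at base
        have e1 : board[m]'hbl = board.getD m 0 := (List.getD_eq_getElem board 0 hbl).symm
        rw [e1] at base
        exact base.trans hperm
      rw [hstep, hbody]
      rw [ih (m + 1) (by omega) _ (odd ^^ true) hperm2]
      rw [foldl_cpt sol (List.range' (m + 1) c) _ 1]
      rw [decide_parity]
      cases odd <;> simp

-- ===== VERDICT (by name: the statement is the Claim_ definition above) =====
theorem resolvable_spec : Claim_equal_resolvable := by
  intro mixe solution _ hpre
  obtain ⟨h4m, h4s, hls, hlm, hmem⟩ := hpre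
  show resolvable mixe solution = resolvable_alt mixe solution
  simp only [resolvable, resolvable_alt]
  rw [List.range_eq_range']
  rw [loop_sync (pvFlat solution) (pvFlat mixe) hmem hlm 15 0 (by omega) (pvFlat mixe) false
    (List.Perm.refl _), Bool.false_xor]
  by_cases h : (((List.range' 0 15).foldl (bodyA (pvFlat solution)) (pvFlat mixe, 0)).2) % 2 = 1
  · simp [h]
  · have h0 : (((List.range' 0 15).foldl (bodyA (pvFlat solution)) (pvFlat mixe, 0)).2) % 2 = 0 := by
      omega
    simp [h0]
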